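-- pv_equiv track=rewrite | github.com/Tenebriso/Advent-of-code | 2023/7/2.py | get_card_with_max_occurrences_in_hand
-- ===== SOURCE A (Python) =====
-- from collections import Counter
-- from functools import cmp_to_key
--
-- CARD_STRENGTH = {
--     'A': 13, 'K': 12, 'Q': 11, 'T': 9, '9': 8, '8': 7, '7': 6, '6': 5, '5': 4, '4': 3, '3': 2, '2': 1, 'J': 0
-- }
--
-- def get_card_with_max_occurrences_in_hand(hand):
--     """
--     Replace Jokers with the card with the max number of occurrences.
--     If there are multiple cards with the same number of occurrences, replace with the stronger one.
--     """
--     occurrences = Counter(hand)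
--     # exclude jokers
--     occurrences['J'] = -1
--     max_occurrences = max(occurrences.values())
--     sorted_cards = sorted(occurrences.keys(), key=cmp_to_key(compare_cards), reverse=True)
--     for card in sorted_cards:
--         if occurrences[card] == max_occurrences:
--             return card
--
-- def compare_cards(card1, card2):
--     if CARD_STRENGTH[card1] < CARD_STRENGTH[card2]:
--         return -1
--     if CARD_STRENGTH[card1] > CARD_STRENGTH[card2]:
--         return 1
--     return 0
-- ===== SOURCE B (Python) =====
-- from collections import Counter
--
-- CARD_STRENGTH = {
--     'A': 13, 'K': 12, 'Q': 11, 'T': 9, '9': 8, '8': 7, '7': 6, '6': 5, '5': 4, '4': 3, '3': 2, '2': 1, 'J': 0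
-- }
--
-- def get_card_with_max_occurrences_in_hand(hand):
--     """
--     Replace Jokers with the card with the max number of occurrences.
--     If there are multiple cards with the same number of occurrences, replace with the stronger one.
--     """
--     occurrences = Counter(hand)
--     # exclude jokers
--     occurrences['J'] = -1
--     return max(occurrences, key=lambda c: (occurrences[c], CARD_STRENGTH[c]))
-- ===== Notes on version B (the rewrite author's own statement) =====
-- stated objective: simpler
-- what changed: Replaces the cmp_to_key sort of all keys plus a linear scan for the max count with a single max() over the Counter using a composite (count, strength) key, dropping compare_cards entirely.
import Mathlib
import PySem

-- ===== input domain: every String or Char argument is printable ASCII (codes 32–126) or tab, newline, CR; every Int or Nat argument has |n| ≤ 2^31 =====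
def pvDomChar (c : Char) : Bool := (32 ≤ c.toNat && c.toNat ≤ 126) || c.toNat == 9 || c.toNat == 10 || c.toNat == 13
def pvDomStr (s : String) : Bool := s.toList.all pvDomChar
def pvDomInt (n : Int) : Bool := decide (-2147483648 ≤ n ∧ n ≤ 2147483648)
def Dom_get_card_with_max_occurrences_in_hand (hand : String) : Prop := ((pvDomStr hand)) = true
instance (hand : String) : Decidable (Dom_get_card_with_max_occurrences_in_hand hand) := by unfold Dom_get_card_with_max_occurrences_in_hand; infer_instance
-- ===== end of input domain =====

-- B replaces A's cmp_to_key sort of the keys plus a linear scan for the max count by a single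
-- max() over the Counter with a composite (count, strength) key (objective: simpler).

-- ===== PORT A =====
-- CARD_STRENGTH, the module constant both Pythons use
def CARD_STRENGTH : PySem.Dict Char Int :=
  PySem.Dict.ofList [('A',13),('K',12),('Q',11),('T',9),('9',8),('8',7),('7',6),('6',5),('5',4),('4',3),('3',2),('2',1),('J',0)]

-- sorted(keys, key=cmp_to_key(compare_cards), reverse=True): compare_cards compares the
-- CARD_STRENGTH values, so this is exactly a stable sort on key CARD_STRENGTH[c], reverse=True.
-- The two unreachable "" branches are totality guards: 'J' is always a key (so values ≠ [])
-- and the maximum of the values is attained at some key.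
def get_card_with_max_occurrences_in_hand (hand : String) : String :=
  let occurrences := (PySem.Dict.counter hand.toList).insert 'J' (-1)
  match PySem.List.max? occurrences.values (fun v => v) with
  | none => ""
  | some maxOccurrences =>
    let sortedCards := PySem.List.sorted occurrences.keys (fun c => CARD_STRENGTH.getD c 0) (reverse := true)
    match sortedCards.find? (fun c => occurrences.getD c 0 == maxOccurrences) with
    | some card => String.ofList [card]
    | none => ""

-- ===== PORT B =====
-- max(occurrences, key=lambda c: (occurrences[c], CARD_STRENGTH[c])) — iterate the keys in
-- insertion order, keep the element with lexicographically maximal (count, strength).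
def get_card_with_max_occurrences_in_hand_alt (hand : String) : String :=
  let occurrences := (PySem.Dict.counter hand.toList).insert 'J' (-1)
  match PySem.List.max2? occurrences.keys
      (fun c => occurrences.getD c 0) (fun c => CARD_STRENGTH.getD c 0) with
  | some c => String.ofList [c]
  | none => ""

-- ===== PRECONDITION & SPEC =====
def pvCards : List Char := ['A','K','Q','T','9','8','7','6','5','4','3','2','J']

-- Python A raises KeyError (in compare_cards / the key lambda) as soon as the hand contains a
-- character that is not one of the 13 card labels; B raises there too.
def Pre_get_card_with_max_occurrences_in_hand (hand : String) : Prop :=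
  hand.toList.all (fun c => pvCards.contains c) = true
instance (hand : String) : Decidable (Pre_get_card_with_max_occurrences_in_hand hand) := by unfold Pre_get_card_with_max_occurrences_in_hand; infer_instance

def pvWitness_get_card_with_max_occurrences_in_hand : String := "KJJT3"

def Spec_get_card_with_max_occurrences_in_hand (hand : String) (out : String) : Prop := out = get_card_with_max_occurrences_in_hand_alt hand
instance (hand : String) (out : String) : Decidable (Spec_get_card_with_max_occurrences_in_hand hand out) := by unfold Spec_get_card_with_max_occurrences_in_hand; infer_instance

-- ===== CLAIM (what is proved, stated in full; the proofs are below) =====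
def Claim_equal_get_card_with_max_occurrences_in_hand : Prop := ∀ (hand : String), Dom_get_card_with_max_occurrences_in_hand hand → Pre_get_card_with_max_occurrences_in_hand hand → Spec_get_card_with_max_occurrences_in_hand hand (get_card_with_max_occurrences_in_hand hand)

-- ===== LEMMAS AND PROOFS =====

-- "y is strictly lexicographically below m under (k1, k2)"
def pvBelow (k1 k2 : Char → Int) (m y : Char) : Prop :=
  k1 y < k1 m ∨ (k1 y = k1 m ∧ k2 y < k2 m)

-- the fold step of PySem.List.max2?
def pvStep (k1 k2 : Char → Int) (acc : Option Char) (x : Char) : Option Char :=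
  match acc with
  | none => some x
  | some m =>
    if (decide (k1 m < k1 x) || !decide (k1 x < k1 m) && decide (k2 m < k2 x)) = true then some x else some m

lemma pvMax2_eq (xs : List Char) (k1 k2 : Char → Int) :
    PySem.List.max2? xs k1 k2 = xs.foldl (pvStep k1 k2) none := by
  unfold PySem.List.max2?
  congr 1
  funext acc x
  cases acc <;> rfl

lemma pvStep_keep (k1 k2 : Char → Int) (m x : Char) (hx : x = m ∨ pvBelow k1 k2 m x) :
    pvStep k1 k2 (some m) x = some m := by
  unfold pvStep
  rcases hx with h | h
  · subst h; simp
  · rcases h with h | ⟨h1, h2⟩ <;> simp <;> omega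

lemma pvStep_take (k1 k2 : Char → Int) (m a : Char) (ha : pvBelow k1 k2 m a) :
    pvStep k1 k2 (some a) m = some m := by
  unfold pvStep
  rcases ha with h | ⟨h1, h2⟩ <;> simp <;> omega

lemma pvFoldl_keep (k1 k2 : Char → Int) (m : Char) :
    ∀ (xs : List Char), (∀ y ∈ xs, y = m ∨ pvBelow k1 k2 m y) →
      xs.foldl (pvStep k1 k2) (some m) = some m := by
  intro xs
  induction xs with
  | nil => simp
  | cons x t ih =>
    intro h
    rw [List.foldl_cons, pvStep_keep k1 k2 m x (h x (by simp))]
    exact ih (fun y hy => h y (by simp [hy]))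

lemma pvFoldl_reach (k1 k2 : Char → Int) (m : Char) :
    ∀ (xs : List Char) (a : Char), (∀ y ∈ xs, y = m ∨ pvBelow k1 k2 m y) →
      pvBelow k1 k2 m a → m ∈ xs →
      xs.foldl (pvStep k1 k2) (some a) = some m := by
  intro xs
  induction xs with
  | nil => simp
  | cons x t ih =>
    intro a h ha hm
    by_cases hx : x = m
    · subst hx
      rw [List.foldl_cons, pvStep_take k1 k2 x a ha]
      exact pvFoldl_keep k1 k2 x t (fun y hy => h y (by simp [hy]))
    · have hbx : pvBelow k1 k2 m x := by
        rcases h x (by simp) with h' | h'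
        · exact absurd h' hx
        · exact h'
      have hmt : m ∈ t := by
        rcases List.mem_cons.mp hm with h' | h'
        · exact absurd h'.symm hx
        · exact h'
      rw [List.foldl_cons]
      by_cases hc : (decide (k1 a < k1 x) || !decide (k1 x < k1 a) && decide (k2 a < k2 x)) = true
      · have hs : pvStep k1 k2 (some a) x = some x := by unfold pvStep; simp [hc]
        rw [hs]
        exact ih x (fun y hy => h y (by simp [hy])) hbx hmt
      · have hs : pvStep k1 k2 (some a) x = some a := by unfold pvStep; simp [hc]
        rw [hs]
        exact ih a (fun y hy => h y (by simp [hy])) ha hmt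

lemma pvMax2_eq_of_below (xs : List Char) (k1 k2 : Char → Int) (m : Char)
    (hm : m ∈ xs) (hdom : ∀ y ∈ xs, y = m ∨ pvBelow k1 k2 m y) :
    PySem.List.max2? xs k1 k2 = some m := by
  rw [pvMax2_eq]
  cases xs with
  | nil => simp at hm
  | cons x t =>
    have h0 : pvStep k1 k2 none x = some x := rfl
    rw [List.foldl_cons, h0]
    by_cases hx : x = m
    · subst hx
      exact pvFoldl_keep k1 k2 x t (fun y hy => hdom y (by simp [hy]))
    · have hbx : pvBelow k1 k2 m x := by
        rcases hdom x (by simp) with h' | h'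
        · exact absurd h' hx
        · exact h'
      have hmt : m ∈ t := by
        rcases List.mem_cons.mp hm with h' | h'
        · exact absurd h'.symm hx
        · exact h'
      exact pvFoldl_reach k1 k2 m t x (fun y hy => hdom y (by simp [hy])) hbx hmt

-- first match in a list sorted by descending k2: if m matches and every other match is
-- strictly k2-below m, find? returns m
lemma pvFind_sorted (p : Char → Bool) (k2 : Char → Int) (m : Char) :
    ∀ (S : List Char), S.Pairwise (fun a b => k2 b ≤ k2 a) → m ∈ S → p m = true →
      (∀ y ∈ S, p y = true → y ≠ m → k2 y < k2 m) → S.find? p = some m := by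
  intro S
  induction S with
  | nil => simp
  | cons x t ih =>
    intro hpair hm hpm hlt
    rcases List.pairwise_cons.mp hpair with ⟨hx, hpt⟩
    by_cases hxm : x = m
    · subst hxm; simp [List.find?, hpm]
    · have hmt : m ∈ t := by
        rcases List.mem_cons.mp hm with h' | h'
        · exact absurd h'.symm hxm
        · exact h'
      cases hpx : p x with
      | true =>
        exact absurd (hx m hmt) (not_le.mpr (hlt x (by simp) hpx hxm))
      | false =>
        simp only [List.find?, hpx]
        exact ih hpt hmt hpm (fun y hy hpy => hlt y (by simp [hy]) hpy)

-- existence of a lexicographic maximum when k2 is injective on the list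
lemma pvExists_max (k1 k2 : Char → Int)
    (hinj : ∀ a ∈ pvCards, ∀ b ∈ pvCards, k2 a = k2 b → a = b) :
    ∀ (xs : List Char), xs ≠ [] → (∀ c ∈ xs, c ∈ pvCards) →
      ∃ m ∈ xs, ∀ y ∈ xs, y = m ∨ pvBelow k1 k2 m y := by
  intro xs
  induction xs with
  | nil => simp
  | cons x t ih =>
    intro _ hsub
    by_cases ht : t = []
    · subst ht
      exact ⟨x, by simp, by simp⟩
    · rcases ih ht (fun c hc => hsub c (by simp [hc])) with ⟨m, hm, hdom⟩
      by_cases hbx : x = m ∨ pvBelow k1 k2 m x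
      · refine ⟨m, by simp [hm], fun y hy => ?_⟩
        rcases List.mem_cons.mp hy with h | h
        · subst h; exact hbx
        · exact hdom y h
      · -- x is not below m and not m itself, so (k1 m, k2 m) < (k1 x, k2 x) lexicographically
        push Not at hbx
        obtain ⟨hxm, hnb⟩ := hbx
        have hk2 : k2 x ≠ k2 m := fun h =>
          hxm (hinj x (hsub x (by simp)) m (hsub m (by simp [hm])) h)
        have hmb : pvBelow k1 k2 x m := by
          unfold pvBelow at hnb ⊢
          push Not at hnb
          obtain ⟨h1, h2⟩ := hnb
          by_cases he : k1 m = k1 x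
          · refine Or.inr ⟨he, ?_⟩
            have := h2 he.symm
            omega
          · left; omega
        refine ⟨x, by simp, fun y hy => ?_⟩
        rcases List.mem_cons.mp hy with h | h
        · exact Or.inl h
        · right
          rcases hdom y h with h' | h'
          · exact h' ▸ hmb
          · unfold pvBelow at hmb h' ⊢
            rcases hmb with h1 | ⟨h1, h2⟩ <;> rcases h' with h3 | ⟨h3, h4⟩ <;>
              first | (left; omega) | (right; exact ⟨by omega, by omega⟩)

-- strength values are pairwise distinct on the 13 card labels
lemma pvStrength_inj : ∀ a ∈ pvCards, ∀ b ∈ pvCards,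
    CARD_STRENGTH.getD a 0 = CARD_STRENGTH.getD b 0 → a = b := by
  intro a ha b hb
  fin_cases ha <;> fin_cases hb <;> decide

-- ===== VERDICT (by name: the statement is the Claim_ definition above) =====
theorem get_card_with_max_occurrences_in_hand_spec : Claim_equal_get_card_with_max_occurrences_in_hand := by
  intro hand _ hpre0
  have hpre : ∀ c ∈ hand.toList, c ∈ pvCards := by
    intro c hc
    exact List.contains_iff_mem.mp (List.all_eq_true.mp hpre0 c hc)
  unfold Spec_get_card_with_max_occurrences_in_hand
  unfold get_card_with_max_occurrences_in_hand get_card_with_max_occurrences_in_hand_alt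
  set occ := (PySem.Dict.counter hand.toList).insert 'J' (-1) with hocc
  let k1 : Char → Int := fun c => occ.getD c 0
  let k2 : Char → Int := fun c => CARD_STRENGTH.getD c 0
  have hnodup : occ.keys.Nodup := by
    rw [hocc]
    exact PySem.Dict.nodup_keys_insert _ _ _ (PySem.Dict.nodup_keys_counter _)
  have hJ : 'J' ∈ occ.keys := by
    rw [hocc]
    exact (PySem.Dict.mem_keys_insert _ _ _ _).mpr (Or.inl rfl)
  have hsub : ∀ c ∈ occ.keys, c ∈ pvCards := by
    intro c hc
    rw [hocc] at hc
    rcases (PySem.Dict.mem_keys_insert _ _ _ _).mp hc with h | h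
    · subst h; decide
    · rw [PySem.Dict.keys_counter] at h
      exact hpre c ((PySem.Set.mem_ofList _ _).mp h)
  have hne : occ.keys ≠ [] := fun h => by simp [h] at hJ
  obtain ⟨m, hm, hdom⟩ := pvExists_max k1 k2 pvStrength_inj occ.keys hne hsub
  have hB : PySem.List.max2? occ.keys k1 k2 = some m := pvMax2_eq_of_below _ _ _ _ hm hdom
  have hvals : occ.values = occ.keys.map k1 := PySem.Dict.values_eq_map_keys occ hnodup 0
  cases hM : PySem.List.max? occ.values (fun v => v) with
  | none =>
    exact absurd (by simpa [hvals] using (PySem.List.max?_eq_none_iff _ _).mp hM) hne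
  | some M =>
    have hMmem : M ∈ occ.values := PySem.List.max?_mem hM
    have hMmax : ∀ v ∈ occ.values, v ≤ M := fun v hv => PySem.List.max?_isMax hM v hv
    have hk1m : k1 m = M := by
      rw [hvals] at hMmem hMmax
      rcases List.mem_map.mp hMmem with ⟨c0, hc0, hc0M⟩
      have h1 : k1 m ≤ M := hMmax _ (List.mem_map.mpr ⟨m, hm, rfl⟩)
      rcases hdom c0 hc0 with h | h
      · rw [h] at hc0M; omega
      · unfold pvBelow at h; omega
    have hfind : (PySem.List.sorted occ.keys (fun c => CARD_STRENGTH.getD c 0) (reverse := true)).find?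
        (fun c => occ.getD c 0 == M) = some m := by
      apply pvFind_sorted (fun c => occ.getD c 0 == M) k2 m
      · exact PySem.List.sorted_pairwise_rev occ.keys k2
      · exact (PySem.List.mem_sorted _ _ _ _).mpr hm
      · simpa using hk1m
      · intro y hy hpy hym
        have hyk : y ∈ occ.keys := (PySem.List.mem_sorted _ _ _ _).mp hy
        rcases hdom y hyk with h | h
        · exact absurd h hym
        · unfold pvBelow at h
          rcases h with h | ⟨_, h⟩
          · exfalso
            have hMy : occ.getD y 0 = M := by simpa using hpy
            have hky : k1 y = occ.getD y 0 := rfl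
            omega
          · exact h
    have hB' : PySem.List.max2? occ.keys (fun c => occ.getD c 0)
        (fun c => CARD_STRENGTH.getD c 0) = some m := hB
    simp only [hM, hfind, hB']
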